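-- pv_equiv track=rewrite | github.com/yotamsu26/AI | ex3/multi_agents.py | merging_potential
-- ===== SOURCE A (Python) =====
-- def merging_potential(board):
--     """
--     For each 2 blocks that could be merged together add the sum of those 2 tiles. (for example if there is 2 128 tiles
--     that are neighbors then add 2*128 to the potential.
--     """
--     potential = 0
--     for i in range(len(board)):
--         for j in range(len(board[0])):
--             if board[i][j] != 0:
--                 if i < len(board)-1 and board[i][j] == board[i+1][j]:
--                     potential += board[i][j] * 2
--                 if j < len(board[0])-1 and board[i][j] == board[i][j+1]:
--                     potential += board[i][j] * 2
--     return potential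
-- ===== SOURCE B (Python) =====
-- def merging_potential(board):
--     def merge_line(seq):
--         if len(seq) < 2:
--             return 0
--         head = 2 * seq[0] if seq[0] == seq[1] and seq[0] != 0 else 0
--         return head + merge_line(seq[1:])
--
--     if not board:
--         return 0
--     w = len(board[0])
--     rows = [[row[j] for j in range(w)] for row in board]
--     cols = [[row[j] for row in rows] for j in range(w)]
--     return sum(merge_line(r) for r in rows) + sum(merge_line(c) for c in cols)
-- ===== Notes on version B (the rewrite author's own statement) =====
-- stated objective: alternative
-- what changed: Replaces A's single index-based double loop with per-cell horizontal and vertical neighbour checks by one reusable recursive merge_line helper over adjacent pairs of a 1-D line, applied to the width-normalized rows and again to the explicitly transposed columns.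
import Mathlib
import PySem

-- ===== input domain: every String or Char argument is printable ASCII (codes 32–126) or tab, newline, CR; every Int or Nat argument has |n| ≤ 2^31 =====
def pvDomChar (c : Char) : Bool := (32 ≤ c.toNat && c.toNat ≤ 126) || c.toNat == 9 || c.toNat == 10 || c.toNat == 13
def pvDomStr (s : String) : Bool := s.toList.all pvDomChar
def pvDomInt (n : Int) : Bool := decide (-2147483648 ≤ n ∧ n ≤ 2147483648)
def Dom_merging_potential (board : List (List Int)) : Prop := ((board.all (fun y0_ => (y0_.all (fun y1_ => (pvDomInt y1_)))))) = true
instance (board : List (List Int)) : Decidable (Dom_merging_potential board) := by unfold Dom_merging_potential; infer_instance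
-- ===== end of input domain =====

-- B replaces A's per-cell double loop with horizontal and vertical neighbour checks
-- by one recursive merge_line helper over adjacent pairs of a line, applied to the
-- width-normalized rows and to the transposed columns (objective: alternative);
-- return values agree on all of Pre_.

-- ===== PORT A =====
-- literal transliteration of A: nested loops over ranges, guarded conditional adds;
-- out-of-range indexing (Python IndexError) is excluded by Pre_ below, so the
-- getD defaults 0 / [] are never reached inside Pre_.
def merging_potential (board : List (List Int)) : Int :=
  (PySem.List.pyRange 0 (board.length : Int)).foldl (fun potential i =>
    (PySem.List.pyRange 0 ((PySem.List.pyGetD board 0 []).length : Int)).foldl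
      (fun potential j =>
        let bij := PySem.List.pyGetD (PySem.List.pyGetD board i []) j 0
        if bij ≠ 0 then
          let potential :=
            if i < (board.length : Int) - 1 ∧
               bij = PySem.List.pyGetD (PySem.List.pyGetD board (i + 1) []) j 0 then
              potential + bij * 2
            else potential
          let potential :=
            if j < ((PySem.List.pyGetD board 0 []).length : Int) - 1 ∧
               bij = PySem.List.pyGetD (PySem.List.pyGetD board i []) (j + 1) 0 then
              potential + bij * 2
            else potential
          potential
        else potential)
      potential) 0

-- ===== PORT B =====
-- def merge_line(seq): if len(seq) < 2: return 0; head = 2*seq[0] if seq[0]==seq[1] and seq[0]!=0 else 0; return head + merge_line(seq[1:])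
def pvMergeLine : List Int → Int
  | [] => 0
  | [_] => 0
  | a :: b :: t => (if a = b ∧ a ≠ 0 then 2 * a else 0) + pvMergeLine (b :: t)

-- if not board: return 0; w = len(board[0]); rows = [[row[j] for j in range(w)] for row in board];
-- cols = [[row[j] for row in rows] for j in range(w)]; return sum(merge_line(r) for r in rows) + sum(merge_line(c) for c in cols)
-- (row[j] raises IndexError on a too-short row, excluded by Pre_ below, so the getD default 0 is never reached inside Pre_)
def merging_potential_alt (board : List (List Int)) : Int :=
  match board with
  | [] => 0
  | r0 :: _ =>
    let w : Nat := r0.length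
    let rows := board.map (fun row =>
      (PySem.List.pyRange 0 (w : Int)).map (fun j => PySem.List.pyGetD row j 0))
    let cols := (PySem.List.pyRange 0 (w : Int)).map (fun j =>
      rows.map (fun row => PySem.List.pyGetD row j 0))
    rows.foldl (fun s r => s + pvMergeLine r) 0 + cols.foldl (fun s c => s + pvMergeLine c) 0

-- ===== PRECONDITION & SPEC =====
-- Pre_ is exactly A's return domain: A indexes every row (and the row below it) at
-- every j < len(board[0]), so A raises IndexError iff some row is shorter than row 0.
def Pre_merging_potential (board : List (List Int)) : Prop :=
  ∀ r ∈ board, (board.headD []).length ≤ r.length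
instance (board : List (List Int)) : Decidable (Pre_merging_potential board) := by
  unfold Pre_merging_potential; infer_instance

def pvWitness_merging_potential : List (List Int) := [[2, 2, 0], [4, 2, 2], [4, 0, 2]]


def Spec_merging_potential (board : List (List Int)) (out : Int) : Prop := out = merging_potential_alt board
instance (board : List (List Int)) (out : Int) : Decidable (Spec_merging_potential board out) := by unfold Spec_merging_potential; infer_instance

-- ===== CLAIM (what is proved, stated in full; the proofs are below) =====
def Claim_equal_merging_potential : Prop := ∀ (board : List (List Int)), Dom_merging_potential board → Pre_merging_potential board → Spec_merging_potential board (merging_potential board)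


-- ===== LEMMAS AND PROOFS =====

-- both programs reduce to the same pair of Nat-indexed sums: pvHN (horizontal
-- merges of row i, over the first pvW columns) and pvVN (vertical merges
-- between rows i and i+1).
def pvW (board : List (List Int)) : Nat := (board.headD []).length

def pvGN (board : List (List Int)) (i j : Nat) : Int := (board.getD i []).getD j 0

def pvHN (board : List (List Int)) (i : Nat) : Int :=
  ((List.range (pvW board - 1)).map (fun j =>
    if pvGN board i j = pvGN board i (j+1) ∧ pvGN board i j ≠ 0 then 2 * pvGN board i j else 0)).sum

def pvVN (board : List (List Int)) (i : Nat) : Int :=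
  ((List.range (pvW board)).map (fun j =>
    if pvGN board i j = pvGN board (i+1) j ∧ pvGN board i j ≠ 0 then 2 * pvGN board i j else 0)).sum

-- the Int-indexed cell read and per-cell contribution of A's inner loop body
def pvG (board : List (List Int)) (ii jj : Int) : Int :=
  PySem.List.pyGetD (PySem.List.pyGetD board ii []) jj 0

def pvTermA (board : List (List Int)) (ii jj : Int) : Int :=
  (if pvG board ii jj ≠ 0 ∧ (ii < (board.length : Int) - 1 ∧ pvG board ii jj = pvG board (ii+1) jj) then
     pvG board ii jj * 2 else 0)
  + (if pvG board ii jj ≠ 0 ∧ (jj < ((PySem.List.pyGetD board 0 []).length : Int) - 1 ∧ pvG board ii jj = pvG board ii (jj+1)) then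
     pvG board ii jj * 2 else 0)

lemma pv_getD_zero (board : List (List Int)) :
    PySem.List.pyGetD board (0 : Int) [] = board.headD [] := by
  have h : PySem.List.pyGetD board ((0 : Nat) : Int) [] = board.getD 0 [] :=
    PySem.List.pyGetD_natCast board 0 []
  rw [show ((0 : Nat) : Int) = (0 : Int) from rfl] at h
  rw [h]
  cases board <;> rfl

lemma pv_body_split (p X : Int) (C1 C2 : Prop) [Decidable C1] [Decidable C2] :
    (if X ≠ 0 then
       (let p1 := if C1 then p + X * 2 else p
        let p2 := if C2 then p1 + X * 2 else p1
        p2)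
     else p)
    = p + ((if X ≠ 0 ∧ C1 then X * 2 else 0) + (if X ≠ 0 ∧ C2 then X * 2 else 0)) := by
  by_cases h0 : X = 0
  · simp [h0]
  · by_cases h1 : C1 <;> by_cases h2 : C2
    all_goals (simp [h0, h1, h2]; try ring)

lemma pv_guard_swap (z : Int) (c e : Prop) [Decidable c] [Decidable e] :
    (if z ≠ 0 ∧ (c ∧ e) then z * 2 else 0)
      = (if c then (if e ∧ z ≠ 0 then 2 * z else 0) else 0) := by
  by_cases h0 : z = 0
  · simp [h0]
  · by_cases hc : c <;> by_cases he : e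
    all_goals (simp [h0, hc, he]; try ring)

lemma pv_sum_restrict (m k : Nat) (v : Nat → Int) (hk : k ≤ m) :
    ((List.range m).map (fun j => if j < k then v j else 0)).sum
      = ((List.range k).map v).sum := by
  induction m with
  | zero =>
      have h0 : k = 0 := Nat.le_zero.mp hk
      subst h0; simp
  | succ m ih =>
      rcases Nat.lt_or_ge m k with h | h
      · have hk2 : k = m + 1 := Nat.le_antisymm hk h
        subst hk2
        refine congrArg List.sum (List.map_congr_left ?_)
        intro j hj
        simp only [List.mem_range] at hj
        simp [hj]
      · rw [List.range_succ, List.map_append, List.sum_append, ih h]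
        simp [Nat.not_lt.mpr h]

lemma pv_map_range {α β : Type} (l : List α) (d : α) (h : α → β) :
    l.map h = (List.range l.length).map (fun i => h (l.getD i d)) := by
  induction l with
  | nil => simp
  | cons a t ih =>
      rw [List.length_cons, List.range_succ_eq_map, List.map_cons, List.map_cons, List.map_map,
        List.getD_cons_zero, ih]
      refine congrArg (List.cons (h a)) (List.map_congr_left fun j hj => ?_)
      simp [Function.comp]

-- A as a sum of per-cell contributions over Int ranges
lemma pv_A_eq (board : List (List Int)) :
    merging_potential board
      = ((PySem.List.pyRange 0 (board.length : Int)).map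
          (fun ii => ((PySem.List.pyRange 0 ((PySem.List.pyGetD board 0 []).length : Int)).map
            (pvTermA board ii)).sum)).sum := by
  unfold merging_potential
  have h1 : ∀ ii : Int,
      (fun (potential : Int) (j : Int) =>
        let bij := PySem.List.pyGetD (PySem.List.pyGetD board ii []) j 0
        if bij ≠ 0 then
          let potential :=
            if ii < (board.length : Int) - 1 ∧
               bij = PySem.List.pyGetD (PySem.List.pyGetD board (ii + 1) []) j 0 then
              potential + bij * 2
            else potential
          let potential :=
            if j < ((PySem.List.pyGetD board 0 []).length : Int) - 1 ∧
               bij = PySem.List.pyGetD (PySem.List.pyGetD board ii []) (j + 1) 0 then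
              potential + bij * 2
            else potential
          potential
        else potential)
      = fun potential j => potential + pvTermA board ii j := by
    intro ii; funext p j
    simp only [pvTermA, pvG]
    exact pv_body_split p _ _ _
  simp only [h1, PySem.List.foldl_add, zero_add]

-- A in Nat-indexed normal form (no precondition needed: all reads use defaults)
lemma pv_A_nat (board : List (List Int)) :
    merging_potential board
      = ((List.range board.length).map (pvHN board)).sum
        + ((List.range (board.length - 1)).map (pvVN board)).sum := by
  have hw0 : PySem.List.pyGetD board 0 [] = board.headD [] := pv_getD_zero board
  have hcell : ∀ i j : Nat, pvG board (i : Int) (j : Int) = pvGN board i j := by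
    intro i j
    simp [pvG, pvGN, PySem.List.pyGetD_natCast]
  have hterm : ∀ i j : Nat,
      pvTermA board (i : Int) (j : Int)
      = (if i < board.length - 1 then
           (if pvGN board i j = pvGN board (i+1) j ∧ pvGN board i j ≠ 0 then 2 * pvGN board i j else 0)
         else 0)
        + (if j < pvW board - 1 then
           (if pvGN board i j = pvGN board i (j+1) ∧ pvGN board i j ≠ 0 then 2 * pvGN board i j else 0)
         else 0) := by
    intro i j
    have hci : ((i : Int) < (board.length : Int) - 1) ↔ i < board.length - 1 := by
      omega
    have hcj : ((j : Int) < ((PySem.List.pyGetD board 0 []).length : Int) - 1) ↔ j < pvW board - 1 := by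
      rw [hw0]
      show ((j : Int) < ((board.headD []).length : Int) - 1) ↔ j < (board.headD []).length - 1
      omega
    have hgi : pvG board ((i : Int) + 1) (j : Int) = pvGN board (i+1) j := by
      rw [show ((i : Int) + 1) = ((i + 1 : Nat) : Int) by push_cast; ring]
      exact hcell (i+1) j
    have hgj : pvG board (i : Int) ((j : Int) + 1) = pvGN board i (j+1) := by
      rw [show ((j : Int) + 1) = ((j + 1 : Nat) : Int) by push_cast; ring]
      exact hcell i (j+1)
    simp only [pvTermA, hgi, hgj, hcell, hci, hcj]
    rw [pv_guard_swap, pv_guard_swap]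
  rw [pv_A_eq]
  simp only [PySem.List.pyRange_zero_natCast, List.map_map, Function.comp_def, hw0]
  simp only [show (board.headD []).length = pvW board from rfl]
  trans (List.map (fun i : Nat =>
      (if i < board.length - 1 then pvVN board i else 0) + pvHN board i)
      (List.range board.length)).sum
  · refine congrArg List.sum (List.map_congr_left fun i hi => ?_)
    show (List.map (fun j : Nat => pvTermA board (i : Int) (j : Int)) (List.range (pvW board))).sum
        = (if i < board.length - 1 then pvVN board i else 0) + pvHN board i
    trans (List.map (fun j : Nat =>
        (if i < board.length - 1 then
           (if pvGN board i j = pvGN board (i+1) j ∧ pvGN board i j ≠ 0 then 2 * pvGN board i j else 0)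
         else 0)
        + (if j < pvW board - 1 then
           (if pvGN board i j = pvGN board i (j+1) ∧ pvGN board i j ≠ 0 then 2 * pvGN board i j else 0)
         else 0)) (List.range (pvW board))).sum
    · exact congrArg List.sum (List.map_congr_left fun j hj => hterm i j)
    · rw [PySem.List.sum_map_add_int]
      congr 1
      · by_cases hi2 : i < board.length - 1
        · simp only [hi2, if_true]
          rfl
        · simp only [hi2, if_false]
          simp
      · rw [pv_sum_restrict _ _ _ (Nat.sub_le _ _)]
        rfl
  · rw [PySem.List.sum_map_add_int, pv_sum_restrict _ _ _ (Nat.sub_le _ _), add_comm]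

-- B-side lemmas: merge_line as a Nat-indexed sum, and the row/column sums
lemma pv_getD_map {α β : Type} (l : List α) (f : α → β) (d : β) (x : α) (i : Nat)
    (h : i < l.length) : (l.map f).getD i d = f (l.getD i x) := by
  rw [List.getD_eq_getElem _ _ (by simpa using h), List.getD_eq_getElem _ _ h]
  simp

lemma pv_merge_line_eq (xs : List Int) :
    pvMergeLine xs
      = ((List.range (xs.length - 1)).map (fun j =>
          if xs.getD j 0 = xs.getD (j+1) 0 ∧ xs.getD j 0 ≠ 0 then 2 * xs.getD j 0 else 0)).sum := by
  induction xs with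
  | nil => simp [pvMergeLine]
  | cons a t ih =>
      cases t with
      | nil => simp [pvMergeLine]
      | cons b u =>
          rw [pvMergeLine, ih]
          simp only [List.length_cons, Nat.add_sub_cancel, List.range_succ_eq_map,
            List.map_cons, List.map_map, List.sum_cons]
          congr 1

lemma pv_sum_range_finset (n : Nat) (f : Nat → Int) :
    ((List.range n).map f).sum = ∑ i ∈ Finset.range n, f i := by
  induction n with
  | zero => simp
  | succ n ih => rw [List.range_succ, List.map_append, List.sum_append, ih,
      Finset.sum_range_succ]; simp

lemma pv_sum_swap (m w : Nat) (F : Nat → Nat → Int) :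
    ((List.range w).map (fun j => ((List.range m).map (fun i => F i j)).sum)).sum
      = ((List.range m).map (fun i => ((List.range w).map (fun j => F i j)).sum)).sum := by
  simp only [pv_sum_range_finset]
  exact Finset.sum_comm

-- B in the same Nat-indexed normal form as A
lemma pv_B_nat (board : List (List Int)) :
    merging_potential_alt board
      = ((List.range board.length).map (pvHN board)).sum
        + ((List.range (board.length - 1)).map (pvVN board)).sum := by
  cases board with
  | nil => simp [merging_potential_alt]
  | cons r0 rest =>
    unfold merging_potential_alt
    simp only [PySem.List.pyRange_zero_natCast, List.map_map, Function.comp_def,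
      PySem.List.pyGetD_natCast, PySem.List.foldl_add, zero_add]
    have hw : r0.length = pvW (r0 :: rest) := rfl
    congr 1
    · -- horizontal part: sum of merge_line over the width-normalized rows
      rw [pv_map_range (r0 :: rest) ([] : List Int)]
      refine congrArg List.sum (List.map_congr_left fun i hi => ?_)
      simp only [List.mem_range] at hi
      rw [pv_merge_line_eq, List.length_map, List.length_range]
      unfold pvHN
      rw [← hw]
      refine congrArg List.sum (List.map_congr_left fun j hj => ?_)
      simp only [List.mem_range] at hj
      rw [PySem.List.getD_map_range _ _ _ _ (by omega : j < r0.length),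
        PySem.List.getD_map_range _ _ _ _ (by omega : j + 1 < r0.length)]
      rfl
    · -- vertical part: sum of merge_line over the transposed columns
      trans ((List.range r0.length).map (fun j =>
          ((List.range ((r0 :: rest).length - 1)).map (fun i =>
            if pvGN (r0 :: rest) i j = pvGN (r0 :: rest) (i+1) j ∧ pvGN (r0 :: rest) i j ≠ 0
            then 2 * pvGN (r0 :: rest) i j else 0)).sum)).sum
      · refine congrArg List.sum (List.map_congr_left fun j hj => ?_)
        simp only [List.mem_range] at hj
        rw [show ((r0 :: rest).map (fun row =>
              ((List.range r0.length).map (fun k => row.getD k 0)).getD j 0))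
            = (r0 :: rest).map (fun row => row.getD j 0) from
          List.map_congr_left fun row _ => PySem.List.getD_map_range _ _ _ _ hj]
        rw [pv_merge_line_eq, List.length_map]
        refine congrArg List.sum (List.map_congr_left fun i hi => ?_)
        simp only [List.mem_range] at hi
        rw [pv_getD_map _ _ _ [] i (by simp only [List.length_cons] at hi ⊢; omega),
          pv_getD_map _ _ _ [] (i+1) (by simp only [List.length_cons] at hi ⊢; omega)]
        rfl
      · rw [pv_sum_swap, hw]
        exact congrArg List.sum (List.map_congr_left fun i _ => rfl)

-- ===== VERDICT (by name: the statement is the Claim_ definition above) =====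
theorem merging_potential_spec : Claim_equal_merging_potential := by
  intro board _ _
  unfold Spec_merging_potential
  rw [pv_A_nat, pv_B_nat]
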